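-- pv_equiv track=rewrite | github.com/richardflentie/regulatory-risk-intelligence | src/bank_alias.py | normalize_bank_name
-- ===== SOURCE A (Python) =====
-- from typing import Dict, List
--
-- BANK_Aliases: Dict[str, List[str]] = {
--     "JPMorgan Chase":[
--     "JP Morgan Chase",
--     "JPMorgan Chase Bank",
--     "JPMorgan Chase & Co.",
--     "JPMorgan"
--     ],
--     "Bank of America": [
--         "Bank of America Corporation",
--         "Bank of America, N.A",
--         "BofA",
--         "Bank of America NA"
--     ],
--     "Wells Fargo": [
--         "Wells Fargo & Company",
--         "Wells Fargo Bank",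
--         "Wells Fargo Bank, N.A",
--         "Wells Fargo N.A"
--     ]
-- }
--
-- def normalize_bank_name(name: str) -> str:
--     """
--     Bank names are standarized using alias dictionary.
--     """
--     name_clean = name.strip()
--
--     for canonical, aliases, in BANK_Aliases.items():
--         if name_clean == canonical:
--             return canonical
--         if name_clean in aliases:
--             return canonical
--
--     return name_clean
-- ===== SOURCE B (Python) =====
-- from typing import Dict, List
--
-- BANK_Aliases: Dict[str, List[str]] = {
--     "JPMorgan Chase":[
--     "JP Morgan Chase",
--     "JPMorgan Chase Bank",
--     "JPMorgan Chase & Co.",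
--     "JPMorgan"
--     ],
--     "Bank of America": [
--         "Bank of America Corporation",
--         "Bank of America, N.A",
--         "BofA",
--         "Bank of America NA"
--     ],
--     "Wells Fargo": [
--         "Wells Fargo & Company",
--         "Wells Fargo Bank",
--         "Wells Fargo Bank, N.A",
--         "Wells Fargo N.A"
--     ]
-- }
--
-- # Prebuilt flat reverse index: canonical -> canonical and every alias -> canonical.
-- REVERSE: Dict[str, str] = {}
-- for _canonical, _aliases in BANK_Aliases.items():
--     REVERSE[_canonical] = _canonical
--     for _a in _aliases:
--         REVERSE[_a] = _canonical
--
-- def normalize_bank_name(name: str) -> str: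
--     """Bank names are standarized via a single prebuilt reverse-lookup dict."""
--     name_clean = name.strip()
--     return REVERSE.get(name_clean, name_clean)
-- ===== Notes on version B (the rewrite author's own statement) =====
-- stated objective: idiomatic
-- what changed: Replaced the per-call loop over canonicals with equality and alias-membership tests by a single prebuilt flat reverse-lookup dict (canonical->canonical, alias->canonical) queried once with .get.
import Mathlib
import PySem

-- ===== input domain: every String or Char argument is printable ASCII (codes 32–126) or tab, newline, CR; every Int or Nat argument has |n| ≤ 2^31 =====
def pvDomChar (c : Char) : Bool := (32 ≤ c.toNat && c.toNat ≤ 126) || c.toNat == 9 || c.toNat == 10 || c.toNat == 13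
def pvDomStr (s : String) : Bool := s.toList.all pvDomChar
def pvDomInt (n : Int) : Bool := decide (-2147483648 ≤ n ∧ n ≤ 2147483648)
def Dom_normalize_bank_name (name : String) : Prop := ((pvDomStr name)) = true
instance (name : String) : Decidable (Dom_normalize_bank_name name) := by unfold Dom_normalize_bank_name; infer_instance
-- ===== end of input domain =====

-- B replaces A's per-call loop over the alias dictionary by one prebuilt flat
-- reverse-lookup dict queried once (idiomatic).


-- ===== PORT A =====
def pvBankAliases : List (String × List String) :=
  [("JPMorgan Chase", ["JP Morgan Chase", "JPMorgan Chase Bank", "JPMorgan Chase & Co.", "JPMorgan"]),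
   ("Bank of America", ["Bank of America Corporation", "Bank of America, N.A", "BofA", "Bank of America NA"]),
   ("Wells Fargo", ["Wells Fargo & Company", "Wells Fargo Bank", "Wells Fargo Bank, N.A", "Wells Fargo N.A"])]

-- the for-loop with its two early returns, as structural recursion returning Option
def pvLoopA (items : List (String × List String)) (nameClean : String) : Option String :=
  match items with
  | [] => none
  | (canonical, aliases) :: rest =>
      if nameClean = canonical then some canonical
      else if aliases.contains nameClean then some canonical
      else pvLoopA rest nameClean

def normalize_bank_name (name : String) : String :=
  let nameClean := PySem.Str.strip name
  match pvLoopA pvBankAliases nameClean with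
  | some c => c
  | none => nameClean

-- ===== PORT B =====
-- module-level build of the flat reverse index (Source B's two nested for-loops)
def pvReverse : PySem.Dict String String :=
  pvBankAliases.foldl
    (fun d p => p.2.foldl (fun d a => d.insert a p.1) (d.insert p.1 p.1))
    PySem.Dict.empty

def normalize_bank_name_alt (name : String) : String :=
  let nameClean := PySem.Str.strip name
  pvReverse.getD nameClean nameClean

-- ===== PRECONDITION & SPEC =====
def Spec_normalize_bank_name (name : String) (out : String) : Prop := out = normalize_bank_name_alt name
instance (name : String) (out : String) : Decidable (Spec_normalize_bank_name name out) := by unfold Spec_normalize_bank_name; infer_instance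

-- ===== CLAIM (what is proved, stated in full; the proofs are below) =====
def Claim_equal_normalize_bank_name : Prop := ∀ (name : String), Dom_normalize_bank_name name → Spec_normalize_bank_name name (normalize_bank_name name)

-- ===== LEMMAS AND PROOFS =====

-- core: for ANY cleaned string s the loop's answer equals the reverse-index lookup
set_option maxHeartbeats 1000000 in
theorem pv_core (s : String) :
    (match pvLoopA pvBankAliases s with
     | some c => c
     | none => s) = pvReverse.getD s s := by
  by_cases h0 : s = "JPMorgan Chase"
  · subst h0; decide
  by_cases h1 : s = "JP Morgan Chase"
  · subst h1; decide
  by_cases h2 : s = "JPMorgan Chase Bank"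
  · subst h2; decide
  by_cases h3 : s = "JPMorgan Chase & Co."
  · subst h3; decide
  by_cases h4 : s = "JPMorgan"
  · subst h4; decide
  by_cases h5 : s = "Bank of America"
  · subst h5; decide
  by_cases h6 : s = "Bank of America Corporation"
  · subst h6; decide
  by_cases h7 : s = "Bank of America, N.A"
  · subst h7; decide
  by_cases h8 : s = "BofA"
  · subst h8; decide
  by_cases h9 : s = "Bank of America NA"
  · subst h9; decide
  by_cases h10 : s = "Wells Fargo"
  · subst h10; decide
  by_cases h11 : s = "Wells Fargo & Company"
  · subst h11; decide
  by_cases h12 : s = "Wells Fargo Bank"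
  · subst h12; decide
  by_cases h13 : s = "Wells Fargo Bank, N.A"
  · subst h13; decide
  by_cases h14 : s = "Wells Fargo N.A"
  · subst h14; decide
  simp [pvLoopA, pvBankAliases, pvReverse, PySem.Dict.getD_eq_get?_getD,
    PySem.Dict.get?_insert, PySem.Dict.get?_empty, h0, h1, h2, h3, h4, h5, h6, h7, h8, h9, h10, h11, h12, h13, h14]

-- ===== VERDICT (by name: the statement is the Claim_ definition above) =====
theorem normalize_bank_name_spec : Claim_equal_normalize_bank_name := by
  intro name _
  unfold Spec_normalize_bank_name normalize_bank_name normalize_bank_name_alt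
  exact pv_core (PySem.Str.strip name)
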